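-- pv_equiv track=rewrite | github.com/anptitd22/PYTHON-PTIT | CodePTIT/PY01024 - CHẴN - LẺ.py | check
-- ===== SOURCE A (Python) =====
-- def check(n):
--     res=n%10
--     n//=10
--     sum=res
--     while n>0:
--         if n%10-res!=2 and res-n%10!=2:
--             return False
--         sum+=n%10
--         res=n%10
--         n//=10
--     return sum%10==0
-- ===== SOURCE B (Python) =====
-- def check(n):
--     digits = [n % 10]
--     n //= 10
--     while n > 0:
--         digits.append(n % 10)
--         n //= 10
--     if any(abs(x - y) != 2 for x, y in zip(digits, digits[1:])):
--         return False
--     return sum(digits) % 10 == 0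
-- ===== Notes on version B (the rewrite author's own statement) =====
-- stated objective: simpler
-- what changed: Replaces A's single interleaved loop (running difference check, running sum and carried previous digit) with a materialised digit list followed by two plain passes: a zip-based adjacency check and sum(digits)%10.
import Mathlib
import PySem

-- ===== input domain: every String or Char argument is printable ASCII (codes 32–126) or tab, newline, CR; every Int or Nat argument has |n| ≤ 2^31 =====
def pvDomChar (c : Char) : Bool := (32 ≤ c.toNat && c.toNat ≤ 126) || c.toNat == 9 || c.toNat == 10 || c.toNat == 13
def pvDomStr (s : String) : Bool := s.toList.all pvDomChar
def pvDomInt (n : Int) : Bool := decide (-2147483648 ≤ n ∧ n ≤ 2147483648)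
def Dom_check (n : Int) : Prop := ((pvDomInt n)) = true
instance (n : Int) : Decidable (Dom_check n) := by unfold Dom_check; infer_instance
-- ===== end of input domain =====

-- B replaces A's interleaved loop by a materialised digit list plus two plain passes (objective: simpler).

-- ===== PORT A =====
-- the while loop of A: state (n, res, sum)
def checkLoop (n res sum : Int) : Bool :=
  if _h : n > 0 then
    if PySem.Int.mod n 10 - res ≠ 2 ∧ res - PySem.Int.mod n 10 ≠ 2 then false
    else checkLoop (PySem.Int.floordiv n 10) (PySem.Int.mod n 10) (sum + PySem.Int.mod n 10)
  else PySem.Int.mod sum 10 == 0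
termination_by n.toNat
decreasing_by
  have h10 : (0:Int) < 10 := by omega
  have := PySem.Int.floordiv_eq_ediv_of_pos (a := n) h10
  omega

def check (n : Int) : Bool :=
  checkLoop (PySem.Int.floordiv n 10) (PySem.Int.mod n 10) (PySem.Int.mod n 10)

-- ===== PORT B =====
-- the digit-collecting while loop of B
def digitsLoop (n : Int) (acc : List Int) : List Int :=
  if _h : n > 0 then
    digitsLoop (PySem.Int.floordiv n 10) (acc ++ [PySem.Int.mod n 10])
  else acc
termination_by n.toNat
decreasing_by
  have h10 : (0:Int) < 10 := by omega
  have := PySem.Int.floordiv_eq_ediv_of_pos (a := n) h10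
  omega

def check_alt (n : Int) : Bool :=
  let digits := digitsLoop (PySem.Int.floordiv n 10) [PySem.Int.mod n 10]
  if (digits.zip (PySem.List.slice digits (some 1) none)).any (fun p => |p.1 - p.2| ≠ 2) then
    false
  else PySem.Int.mod digits.sum 10 == 0

-- ===== PRECONDITION & SPEC =====
def Spec_check (n : Int) (out : Bool) : Prop := out = check_alt n
instance (n : Int) (out : Bool) : Decidable (Spec_check n out) := by unfold Spec_check; infer_instance

-- ===== CLAIM (what is proved, stated in full; the proofs are below) =====
def Claim_equal_check : Prop := ∀ (n : Int), Dom_check n → Spec_check n (check n)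

-- ===== LEMMAS AND PROOFS =====

-- the digits of n (least-significant first), as both loops produce them
def digitsOf (n : Int) : List Int :=
  if _h : n > 0 then PySem.Int.mod n 10 :: digitsOf (PySem.Int.floordiv n 10) else []
termination_by n.toNat
decreasing_by
  have h10 : (0:Int) < 10 := by omega
  have := PySem.Int.floordiv_eq_ediv_of_pos (a := n) h10
  omega

-- adjacency check: all consecutive pairs differ by exactly 2
def adjOK : List Int → Bool
  | a :: b :: t => (|a - b| == 2) && adjOK (b :: t)
  | _ => true

theorem digitsLoop_eq (n : Int) (acc : List Int) : digitsLoop n acc = acc ++ digitsOf n := by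
  induction n, acc using digitsLoop.induct with
  | case1 n acc h ih =>
      rw [digitsLoop, digitsOf]
      simp only [dif_pos h]
      rw [ih]
      simp
  | case2 n acc h =>
      rw [digitsLoop, digitsOf]
      simp [h]

theorem checkLoop_eq (n res sum : Int) :
    checkLoop n res sum =
      (adjOK (res :: digitsOf n) && (PySem.Int.mod (sum + (digitsOf n).sum) 10 == 0)) := by
  induction n, res, sum using checkLoop.induct with
  | case1 n res sum h hbad =>
      rw [checkLoop, digitsOf]
      simp only [dif_pos h, if_pos hbad, adjOK]
      have hab : ¬ (|res - PySem.Int.mod n 10| = 2) := by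
        rcases hbad with ⟨h1, h2⟩
        rcases abs_cases (res - PySem.Int.mod n 10) with ⟨he, _⟩ | ⟨he, _⟩ <;> omega
      simp at hab ⊢
      simp [hab]
  | case2 n res sum h hbad ih =>
      rw [checkLoop, digitsOf]
      simp only [dif_pos h, if_neg hbad]
      rw [ih]
      have hab : |res - PySem.Int.mod n 10| = 2 := by
        rcases not_and_or.mp hbad with h1 | h1
        · rcases abs_cases (res - PySem.Int.mod n 10) with ⟨he, _⟩ | ⟨he, _⟩ <;> omega
        · rcases abs_cases (res - PySem.Int.mod n 10) with ⟨he, _⟩ | ⟨he, _⟩ <;> omega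
      simp only [adjOK]
      simp at hab ⊢
      simp [hab, add_assoc]
  | case3 n res sum h =>
      rw [checkLoop, digitsOf]
      simp [h, adjOK]

theorem zip_any_eq_adjOK (l : List Int) :
    ((l.zip l.tail).any (fun p => |p.1 - p.2| ≠ 2)) = !adjOK l := by
  induction l with
  | nil => simp [adjOK]
  | cons a t ih =>
      cases t with
      | nil => simp [adjOK]
      | cons b t' =>
          simp only [List.tail_cons, List.zip_cons_cons, List.any_cons, adjOK] at *
          rw [ih]
          by_cases hab : |a - b| = 2 <;> simp [hab]

-- ===== VERDICT (by name: the statement is the Claim_ definition above) =====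
theorem check_spec : Claim_equal_check := by
  intro n _
  unfold Spec_check check
  rw [checkLoop_eq]
  simp only [check_alt, digitsLoop_eq, List.singleton_append, PySem.List.slice_from_one,
    zip_any_eq_adjOK]
  by_cases hadj : adjOK (PySem.Int.mod n 10 :: digitsOf (PySem.Int.floordiv n 10))
  · simp [hadj, List.sum_cons]
  · simp
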